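-- pv_equiv track=rewrite | github.com/GazizZhotabayev/Advent-of-Code | 2022/Day 25/AOC_2022_Day_25.py | update_base5
-- ===== SOURCE A (Python) =====
-- def update_base5(s):
--     while 5 in s:
--         for i, c in enumerate(s[::-1]):
--             if c == 5:
--                 if i == len(s)-1:
--                     s = [1,0] + s[1:]
--                 else:
--                     s[len(s)-1-i] = 0
--                     s[len(s)-2-i] += 1
--                 break
--             else:
--                 pass
--     return s
-- ===== SOURCE B (Python) =====
-- def update_base5(s):
--     out = []
--     carry = 0
--     for c in reversed(s):
--         v = c + carry
--         if v == 5: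
--             out.append(0)
--             carry = 1
--         else:
--             out.append(v)
--             carry = 0
--     out.reverse()
--     return [1] + out if carry else out
-- ===== Notes on version B (the rewrite author's own statement) =====
-- stated objective: alternative
-- what changed: Replaces the restart-the-whole-loop carry normalization (re-checking '5 in s' and rescanning s[::-1] for the rightmost 5 after every single carry) with a single right-to-left pass that propagates the carry incrementally and prepends a leading 1 at the end.
import Mathlib
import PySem

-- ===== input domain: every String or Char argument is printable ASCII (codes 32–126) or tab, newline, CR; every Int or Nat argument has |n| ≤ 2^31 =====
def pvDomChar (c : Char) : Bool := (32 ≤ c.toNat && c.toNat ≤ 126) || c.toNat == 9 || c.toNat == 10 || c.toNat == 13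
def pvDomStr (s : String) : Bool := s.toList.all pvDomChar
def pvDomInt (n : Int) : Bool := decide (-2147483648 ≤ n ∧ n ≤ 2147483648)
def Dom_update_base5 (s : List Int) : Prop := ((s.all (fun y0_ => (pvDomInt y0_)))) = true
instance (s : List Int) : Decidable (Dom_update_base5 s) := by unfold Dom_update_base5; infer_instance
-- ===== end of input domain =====

-- B normalizes the digit list in ONE right-to-left pass instead of A's repeated whole-list rescans;
-- equivalence is about the RETURN value only (A mutates its argument list in place, B does not).

-- ===== PORT A =====
-- inner 'for i, c in enumerate(s[::-1]): if c == 5: … break' = index of the first 5 in s[::-1]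
-- the while loop is ported with fuel s.length + 1; the equivalence proof shows this fuel always suffices
def update_base5_loop (fuel : Nat) (s : List Int) : List Int :=
  match fuel with
  | 0 => s
  | fuel + 1 =>
    if (5 : Int) ∈ s then
      match PySem.List.index? s.reverse 5 with
      | none => s   -- unreachable: 5 ∈ s
      | some i =>
        if i = s.length - 1 then
          update_base5_loop fuel (1 :: 0 :: s.drop 1)
        else
          -- s[len-1-i] = 0 ; s[len-2-i] += 1
          let pos := s.length - 1 - i
          let t := s.set pos 0
          update_base5_loop fuel (t.set (pos - 1) (t.getD (pos - 1) 0 + 1))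
    else s

def update_base5 (s : List Int) : List Int := update_base5_loop (s.length + 1) s

-- ===== PORT B =====
-- one right-to-left pass (foldr = B's reversed-iteration with append + final reverse), carry in the state
def update_base5_step (c : Int) (acc : Int × List Int) : Int × List Int :=
  let v := c + acc.1
  if v = 5 then (1, 0 :: acc.2) else (0, v :: acc.2)

def update_base5_alt (s : List Int) : List Int :=
  let r := s.foldr update_base5_step (0, [])
  if r.1 = 1 then 1 :: r.2 else r.2

-- ===== PRECONDITION & SPEC =====
def Spec_update_base5 (s : List Int) (out : List Int) : Prop := out = update_base5_alt s
instance (s : List Int) (out : List Int) : Decidable (Spec_update_base5 s out) := by unfold Spec_update_base5; infer_instance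

-- ===== CLAIM (what is proved, stated in full; the proofs are below) =====
def Claim_equal_update_base5 : Prop := ∀ (s : List Int), Dom_update_base5 s → Spec_update_base5 s (update_base5 s)

-- ===== LEMMAS AND PROOFS =====

-- foldr over a 5-free suffix starting with carry 0 leaves everything unchanged
theorem ub5_foldr_no5 (b : List Int) (h : (5 : Int) ∉ b) :
    b.foldr update_base5_step (0, []) = (0, b) := by
  induction b with
  | nil => rfl
  | cons c t ih =>
    have hc : c ≠ 5 := fun hc => h (hc ▸ List.mem_cons_self)
    have ht : (5 : Int) ∉ t := fun hm => h (List.mem_cons_of_mem _ hm)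
    simp [update_base5_step, ih ht, add_zero, hc]

-- B returns s unchanged when s contains no 5
theorem ub5_alt_no5 (s : List Int) (h : (5 : Int) ∉ s) : update_base5_alt s = s := by
  simp [update_base5_alt, ub5_foldr_no5 s h]

-- first-occurrence decomposition
theorem ub5_first_split (v : Int) (l : List Int) (h : v ∈ l) :
    ∃ c d, l = c ++ v :: d ∧ v ∉ c := by
  induction l with
  | nil => cases h
  | cons x t ih =>
    by_cases hx : x = v
    · exact ⟨[], t, by simp [hx], by simp⟩
    · rcases ih (by rcases List.mem_cons.mp h with h1 | h1; exact absurd h1.symm hx; exact h1) with ⟨c, d, rfl, hc⟩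
      exact ⟨x :: c, d, rfl, by simp [hc, Ne.symm hx]⟩

-- if v does not occur in the prefix u, its first index in u ++ w is ≥ u.length
theorem ub5_index?_ge (u w : List Int) (v : Int) (hu : v ∉ u) (i : Nat)
    (h : PySem.List.index? (u ++ w) v = some i) : u.length ≤ i := by
  rcases PySem.List.getElem_of_index?_eq_some h with ⟨hk, hv, _⟩
  by_contra hlt
  have hul : i < u.length := by omega
  have heq : u[i] = v := by rw [← List.getElem_append_left hul (bs := w)]; exact hv
  exact hu (heq ▸ List.getElem_mem hul)

-- list-surgery helpers
theorem ub5_getD_append (a : List Int) (x : Int) (l : List Int) :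
    (a ++ x :: l).getD a.length 0 = x := by
  induction a with
  | nil => rfl
  | cons y t ih => simpa using ih

theorem ub5_set_append (a : List Int) (x z : Int) (l : List Int) :
    (a ++ x :: l).set a.length z = a ++ z :: l := by
  induction a with
  | nil => rfl
  | cons y t ih => simp [ih]

theorem ub5_set_append1 (a : List Int) (x y z : Int) (l : List Int) :
    (a ++ x :: y :: l).set (a.length + 1) z = a ++ x :: z :: l := by
  induction a with
  | nil => simp [List.set]
  | cons w t ih => simp [ih]

-- key invariant: one carry step of A does not change B's value
theorem ub5_alt_step (a : List Int) (x : Int) (b : List Int) (hb : (5 : Int) ∉ b) :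
    update_base5_alt (a ++ x :: (5 : Int) :: b) = update_base5_alt (a ++ (x + 1) :: (0 : Int) :: b) := by
  unfold update_base5_alt
  have h1 : ((5 : Int) :: b).foldr update_base5_step (0, []) = (1, 0 :: b) := by
    show update_base5_step 5 (b.foldr update_base5_step (0, [])) = (1, 0 :: b)
    rw [ub5_foldr_no5 b hb]; simp [update_base5_step]
  have h2 : ((0 : Int) :: b).foldr update_base5_step (0, []) = (0, 0 :: b) := by
    show update_base5_step 0 (b.foldr update_base5_step (0, [])) = (0, 0 :: b)
    rw [ub5_foldr_no5 b hb]; simp [update_base5_step]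
  have hx : (x :: (5 : Int) :: b).foldr update_base5_step (0, [])
      = ((x + 1) :: (0 : Int) :: b).foldr update_base5_step (0, []) := by
    show update_base5_step x (((5 : Int) :: b).foldr update_base5_step (0, []))
        = update_base5_step (x + 1) (((0 : Int) :: b).foldr update_base5_step (0, []))
    rw [h1, h2]
    simp [update_base5_step]
  simp only [List.foldr_append, hx]

-- head case: B on 5 :: b (no further 5) is 1 :: 0 :: b
theorem ub5_alt_head (b : List Int) (hb : (5 : Int) ∉ b) :
    update_base5_alt ((5 : Int) :: b) = 1 :: 0 :: b := by
  unfold update_base5_alt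
  have h1 : ((5 : Int) :: b).foldr update_base5_step (0, []) = (1, 0 :: b) := by
    show update_base5_step 5 (b.foldr update_base5_step (0, [])) = (1, 0 :: b)
    rw [ub5_foldr_no5 b hb]; simp [update_base5_step]
  rw [h1]
  simp

-- measure: an upper bound on the loop iterations A still needs
def ub5_measure (s : List Int) : Nat :=
  match PySem.List.index? s.reverse 5 with
  | none => 1
  | some i => s.length - i + 1

theorem ub5_loop_eq_alt (fuel : Nat) (s : List Int) (h : ub5_measure s ≤ fuel) :
    update_base5_loop fuel s = update_base5_alt s := by
  induction fuel generalizing s with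
  | zero => exact absurd h (by unfold ub5_measure; split <;> omega)
  | succ m ih =>
    by_cases hmem : (5 : Int) ∈ s
    · -- decompose around the rightmost 5: s = d.reverse ++ 5 :: c.reverse, 5 ∉ c.reverse
      have hrev : (5 : Int) ∈ s.reverse := List.mem_reverse.mpr hmem
      rcases ub5_first_split 5 s.reverse hrev with ⟨c, d, hcd, hc⟩
      have hs : s = d.reverse ++ 5 :: c.reverse := by
        have := congrArg List.reverse hcd
        simpa using this
      have hb : (5 : Int) ∉ c.reverse := fun hm => hc (List.mem_reverse.mp hm)
      have hidx : PySem.List.index? s.reverse 5 = some c.length :=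
        (PySem.List.index?_eq_some_iff _ _ _).mpr ⟨c, d, hcd, rfl, hc⟩
      have hlen : s.length = d.reverse.length + c.length + 1 := by
        rw [hs]
        simp only [List.length_append, List.length_cons, List.length_reverse]
        omega
      have hmeas : ub5_measure s = d.reverse.length + 2 := by
        simp only [ub5_measure, hidx]
        omega
      rw [update_base5_loop]
      simp only [if_pos hmem, hidx]
      by_cases hhead : c.length = s.length - 1
      · -- the rightmost 5 is the head: d.reverse = []
        have hd : d.reverse = ([] : List Int) := by
          have : d.reverse.length = 0 := by omega
          exact List.eq_nil_of_length_eq_zero this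
        rw [if_pos hhead]
        have hs' : s = 5 :: c.reverse := by rw [hs, hd]; rfl
        have hdrop : s.drop 1 = c.reverse := by rw [hs']; rfl
        have hno5 : (5 : Int) ∉ (1 : Int) :: (0 : Int) :: c.reverse := by
          intro hm
          rcases List.mem_cons.mp hm with h1 | h1
          · exact absurd h1.symm (by norm_num)
          rcases List.mem_cons.mp h1 with h2 | h2
          · exact absurd h2.symm (by norm_num)
          · exact hb h2
        have hm2 : ub5_measure (1 :: 0 :: s.drop 1) ≤ m := by
          have hnone : PySem.List.index? ((1 : Int) :: (0 : Int) :: s.drop 1).reverse 5 = none := by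
            rw [hdrop]
            exact (PySem.List.index?_eq_none_iff _ _).mpr
              (fun hm => hno5 (List.mem_reverse.mp hm))
          simp only [ub5_measure, hnone]
          omega
        rw [ih _ hm2, hdrop, ub5_alt_no5 _ hno5, hs', ub5_alt_head _ hb]
      · -- the rightmost 5 is not the head: d.reverse = a' ++ [x]
        rw [if_neg hhead]
        rcases List.eq_nil_or_concat d.reverse with hnil | ⟨a', x, ha⟩
        · exact absurd (by rw [hs, hnil]; simp) hhead
        have hal : d.reverse.length = a'.length + 1 := by rw [ha]; simp
        have hpos : s.length - 1 - c.length = a'.length + 1 := by omega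
        have hs2 : s = a' ++ x :: 5 :: c.reverse := by rw [hs, ha]; simp
        simp only [hpos]
        have hset1 : s.set (a'.length + 1) 0 = a' ++ x :: (0 : Int) :: c.reverse := by
          rw [hs2]; exact ub5_set_append1 a' x 5 0 c.reverse
        rw [hset1]
        have hget : (a' ++ x :: (0 : Int) :: c.reverse).getD (a'.length + 1 - 1) 0 = x := by
          simp only [Nat.add_sub_cancel]
          exact ub5_getD_append a' x _
        rw [hget]
        have hset2 : (a' ++ x :: (0 : Int) :: c.reverse).set (a'.length + 1 - 1) (x + 1)
            = a' ++ (x + 1) :: (0 : Int) :: c.reverse := by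
          simp only [Nat.add_sub_cancel]
          exact ub5_set_append a' x (x + 1) _
        rw [hset2]
        -- the new list's rightmost 5 (if any) is strictly left of the old one
        have hm2 : ub5_measure (a' ++ (x + 1) :: (0 : Int) :: c.reverse) ≤ m := by
          simp only [ub5_measure]
          rcases hi : PySem.List.index? (a' ++ (x + 1) :: (0 : Int) :: c.reverse).reverse 5 with _ | i
          · show (1 : Nat) ≤ m
            omega
          · have hrw : (a' ++ (x + 1) :: (0 : Int) :: c.reverse).reverse
                = (c ++ [(0 : Int)]) ++ (x + 1) :: a'.reverse := by simp
            rw [hrw] at hi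
            have hnotpre : (5 : Int) ∉ c ++ [(0 : Int)] := by
              intro hm5
              rcases List.mem_append.mp hm5 with h1 | h1
              · exact hc h1
              · simp at h1
            have hge := ub5_index?_ge _ _ 5 hnotpre i hi
            have hil : (c ++ [(0 : Int)]).length = c.length + 1 := by simp
            have hnl : (a' ++ (x + 1) :: (0 : Int) :: c.reverse).length
                = a'.length + (c.length + 2) := by simp
            show (a' ++ (x + 1) :: (0 : Int) :: c.reverse).length - i + 1 ≤ m
            omega
        rw [ih _ hm2, hs2, ub5_alt_step a' x c.reverse hb]
    · rw [update_base5_loop, if_neg hmem, ub5_alt_no5 s hmem]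

-- ===== VERDICT (by name: the statement is the Claim_ definition above) =====
theorem update_base5_spec : Claim_equal_update_base5 := by
  intro s _
  unfold Spec_update_base5 update_base5
  apply ub5_loop_eq_alt
  unfold ub5_measure
  split
  · omega
  · rename_i i hi
    have := PySem.List.getElem_of_index?_eq_some hi
    rcases this with ⟨hk, _, _⟩
    simp at hk
    omega
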